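-- pv_equiv track=rewrite | github.com/Showmake2/pHbuilder | result_analysis.py | get_pocket_residues_simple
-- ===== SOURCE A (Python) =====
-- def get_pocket_residues_simple(pocket_centers, cutoff=0.8):
--     """
--     Simple method: determine pocket residues based on sequence distance
--     This is an approximation method suitable for cases without MDAnalysis
--     """
--     pocket_residues = set()
--
--     # Add surrounding residues for each center residue
--     for center in pocket_centers:
--         # Add adjacent residues in sequence (rough approximation of 8Å spatial range)
--         for offset in range(-10, 11):  # Approximately corresponds to 8Å sequence range
--             residue = center + offset
--             if residue > 0:  # Ensure positive residue numbers
--                 pocket_residues.add(residue)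
--
--     return sorted(list(pocket_residues))
-- ===== SOURCE B (Python) =====
-- def get_pocket_residues_simple(pocket_centers, cutoff=0.8):
--     # Sweep over the sorted centers maintaining disjoint merged intervals
--     # (held newest-first); expand them oldest-first into the sorted result.
--     intervals = []  # newest interval first
--     for c in sorted(pocket_centers):
--         lo, hi = max(1, c - 10), c + 10
--         if hi < 1:
--             continue  # entire window nonpositive
--         if intervals and lo <= intervals[0][1] + 1:
--             plo, phi = intervals[0]
--             intervals[0] = (plo, max(phi, hi))
--         else:
--             intervals.insert(0, (lo, hi))
--     result = []
--     for lo, hi in reversed(intervals):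
--         result.extend(range(lo, hi + 1))
--     return result
-- ===== Notes on version B (the rewrite author's own statement) =====
-- stated objective: faster
-- what changed: Instead of inserting every individual residue of every 21-wide window into a set and then sorting it, B sorts the centers once, merges the clamped windows into disjoint intervals in a single sweep, and expands the merged intervals in order, yielding the already-sorted list.
import Mathlib
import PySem

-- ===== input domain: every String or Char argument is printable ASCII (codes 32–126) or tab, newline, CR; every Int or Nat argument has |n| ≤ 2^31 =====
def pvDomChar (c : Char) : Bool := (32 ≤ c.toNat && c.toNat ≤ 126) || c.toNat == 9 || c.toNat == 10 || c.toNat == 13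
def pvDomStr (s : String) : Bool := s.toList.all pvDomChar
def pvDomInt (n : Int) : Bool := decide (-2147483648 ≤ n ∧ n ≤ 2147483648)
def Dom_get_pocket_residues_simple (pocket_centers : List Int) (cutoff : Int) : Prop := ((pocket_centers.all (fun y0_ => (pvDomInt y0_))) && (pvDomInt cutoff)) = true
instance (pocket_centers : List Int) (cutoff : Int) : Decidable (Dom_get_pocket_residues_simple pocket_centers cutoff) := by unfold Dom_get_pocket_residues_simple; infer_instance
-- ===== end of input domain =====

-- B replaces A's per-residue set accumulation + sort by a sort-and-merge-intervals sweep whose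
-- in-order expansion is already sorted (objective: faster, measured).

-- ===== PORT A =====
def get_pocket_residues_simple (pocket_centers : List Int) (cutoff : Int) : List Int :=
  let pocket_residues : PySem.Set Int :=
    pocket_centers.foldl (fun s center =>
      (PySem.List.pyRange (-10) 11 1).foldl (fun s offset =>
        let residue := center + offset
        if residue > 0 then PySem.Set.add s residue else s) s)
      PySem.Set.empty
  PySem.List.sorted pocket_residues (fun x => x) false

-- ===== PORT B =====
-- one sweep step of Source B's for-loop; `intervals` newest-first (Python's intervals[0] = head)
def pvAltStep (intervals : List (Int × Int)) (c : Int) : List (Int × Int) :=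
  let lo := max 1 (c - 10)
  let hi := c + 10
  if hi < 1 then intervals
  else
    match intervals with
    | (plo, phi) :: rest =>
        if lo ≤ phi + 1 then (plo, max phi hi) :: rest
        else (lo, hi) :: (plo, phi) :: rest
    | [] => [(lo, hi)]

-- Source B's final loop: extend `result` with range(lo, hi+1) for each interval, oldest first
def pvExpand (intervals : List (Int × Int)) : List Int :=
  intervals.reverse.foldl (fun result iv => result ++ PySem.List.pyRange iv.1 (iv.2 + 1) 1) []

def get_pocket_residues_simple_alt (pocket_centers : List Int) (cutoff : Int) : List Int :=
  pvExpand ((PySem.List.sorted pocket_centers (fun x => x) false).foldl pvAltStep [])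

-- ===== PRECONDITION & SPEC =====
def Spec_get_pocket_residues_simple (pocket_centers : List Int) (cutoff : Int) (out : List Int) : Prop := out = get_pocket_residues_simple_alt pocket_centers cutoff
instance (pocket_centers : List Int) (cutoff : Int) (out : List Int) : Decidable (Spec_get_pocket_residues_simple pocket_centers cutoff out) := by unfold Spec_get_pocket_residues_simple; infer_instance

-- ===== CLAIM (what is proved, stated in full; the proofs are below) =====
def Claim_equal_get_pocket_residues_simple : Prop := ∀ (pocket_centers : List Int) (cutoff : Int), Dom_get_pocket_residues_simple pocket_centers cutoff → Spec_get_pocket_residues_simple pocket_centers cutoff (get_pocket_residues_simple pocket_centers cutoff)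

-- ===== LEMMAS AND PROOFS =====

-- coverage of a list of intervals
def pvCov (ivs : List (Int × Int)) (r : Int) : Prop := ∃ iv ∈ ivs, iv.1 ≤ r ∧ r ≤ iv.2

-- well-formed, pairwise separated (newest-first) intervals
def pvGood (ivs : List (Int × Int)) : Prop :=
  (∀ iv ∈ ivs, 1 ≤ iv.1 ∧ iv.1 ≤ iv.2) ∧ ivs.Pairwise (fun a b => b.2 + 2 ≤ a.1)

-- A's inner loop over offsets adds exactly the positive residues of the window
lemma pv_mem_inner (c : Int) (l : List Int) (s : List Int) (r : Int) :
    r ∈ l.foldl (fun s offset =>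
        if c + offset > 0 then PySem.Set.add s (c + offset) else s) s ↔
      r ∈ s ∨ ∃ o ∈ l, r = c + o ∧ 0 < r := by
  induction l generalizing s with
  | nil => simp
  | cons o t ih =>
    simp only [List.foldl_cons, ih, List.mem_cons]
    split_ifs with h
    · simp only [PySem.Set.mem_add]
      constructor
      · rintro (( hs | rfl) | ⟨o', ho', rfl, hr⟩)
        · exact Or.inl hs
        · exact Or.inr ⟨o, Or.inl rfl, rfl, h⟩
        · exact Or.inr ⟨o', Or.inr ho', rfl, hr⟩
      · rintro (hs | ⟨o', (rfl | ho'), rfl, hr⟩)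
        · exact Or.inl (Or.inl hs)
        · exact Or.inl (Or.inr rfl)
        · exact Or.inr ⟨o', ho', rfl, hr⟩
    · constructor
      · rintro (hs | ⟨o', ho', rfl, hr⟩)
        · exact Or.inl hs
        · exact Or.inr ⟨o', Or.inr ho', rfl, hr⟩
      · rintro (hs | ⟨o', (rfl | ho'), rfl, hr⟩)
        · exact Or.inl hs
        · exact absurd hr h
        · exact Or.inr ⟨o', ho', rfl, hr⟩

lemma pv_nodup_inner (c : Int) (l : List Int) (s : List Int) (hs : s.Nodup) :
    (l.foldl (fun s offset =>
        if c + offset > 0 then PySem.Set.add s (c + offset) else s) s).Nodup := by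
  induction l generalizing s with
  | nil => exact hs
  | cons o t ih =>
    simp only [List.foldl_cons]
    split_ifs with h
    · exact ih _ (PySem.Set.nodup_add s (c + o) hs)
    · exact ih _ hs

-- A's outer loop: membership of the residue set
lemma pv_mem_outer (l : List Int) (s : List Int) (r : Int) :
    r ∈ l.foldl (fun s center =>
        (PySem.List.pyRange (-10) 11 1).foldl (fun s offset =>
          if center + offset > 0 then PySem.Set.add s (center + offset) else s) s) s ↔
      r ∈ s ∨ (0 < r ∧ ∃ c ∈ l, c - 10 ≤ r ∧ r ≤ c + 10) := by
  induction l generalizing s with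
  | nil => simp
  | cons c t ih =>
    simp only [List.foldl_cons, ih, pv_mem_inner, List.mem_cons]
    constructor
    · rintro ((hs | ⟨o, ho, rfl, hr⟩) | ⟨hr, c', hc', h1, h2⟩)
      · exact Or.inl hs
      · rw [PySem.List.mem_pyRange_one] at ho
        exact Or.inr ⟨hr, c, Or.inl rfl, by omega, by omega⟩
      · exact Or.inr ⟨hr, c', Or.inr hc', h1, h2⟩
    · rintro (hs | ⟨hr, c', (rfl | hc'), h1, h2⟩)
      · exact Or.inl (Or.inl hs)
      · refine Or.inl (Or.inr ⟨r - c', ?_, by ring, hr⟩)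
        rw [PySem.List.mem_pyRange_one]; omega
      · exact Or.inr ⟨hr, c', hc', h1, h2⟩

lemma pv_nodup_outer (l : List Int) (s : List Int) (hs : s.Nodup) :
    (l.foldl (fun s center =>
        (PySem.List.pyRange (-10) 11 1).foldl (fun s offset =>
          if center + offset > 0 then PySem.Set.add s (center + offset) else s) s) s).Nodup := by
  induction l generalizing s with
  | nil => exact hs
  | cons c t ih => exact ih _ (pv_nodup_inner _ _ _ hs)

-- pvExpand on a cons: the head (newest) interval's range goes to the back
lemma pvExpand_cons (iv : Int × Int) (rest : List (Int × Int)) :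
    pvExpand (iv :: rest) = pvExpand rest ++ PySem.List.pyRange iv.1 (iv.2 + 1) 1 := by
  simp [pvExpand, List.foldl_append]

lemma pvExpand_mem (ivs : List (Int × Int)) (r : Int) :
    r ∈ pvExpand ivs ↔ pvCov ivs r := by
  induction ivs with
  | nil => simp [pvExpand, pvCov]
  | cons iv rest ih =>
    simp only [pvExpand_cons, List.mem_append, ih, pvCov, List.mem_cons,
      PySem.List.mem_pyRange_one]
    constructor
    · rintro (⟨iv', h1, h2⟩ | ⟨h1, h2⟩)
      · exact ⟨iv', Or.inr h1, h2⟩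
      · exact ⟨iv, Or.inl rfl, h1, by omega⟩
    · rintro ⟨iv', (rfl | h), h1, h2⟩
      · exact Or.inr ⟨h1, by omega⟩
      · exact Or.inl ⟨iv', h, h1, h2⟩

lemma pvExpand_pairwise (ivs : List (Int × Int)) (hg : pvGood ivs) :
    (pvExpand ivs).Pairwise (· < ·) := by
  induction ivs with
  | nil => simp [pvExpand]
  | cons iv rest ih =>
    obtain ⟨hwf, hp⟩ := hg
    rw [List.pairwise_cons] at hp
    rw [pvExpand_cons, List.pairwise_append]
    refine ⟨ih ⟨fun iv' h => hwf iv' (List.mem_cons_of_mem _ h), hp.2⟩,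
      PySem.List.pairwise_lt_pyRange_one _ _, ?_⟩
    intro x hx y hy
    rw [pvExpand_mem] at hx
    obtain ⟨iv', hiv', hx1, hx2⟩ := hx
    rw [PySem.List.mem_pyRange_one] at hy
    have := hp.1 iv' hiv'
    omega

-- the sweep invariant: one pass of foldl pvAltStep over a sorted tail
lemma pv_sweep (cs : List Int) : ∀ (ivs : List (Int × Int)),
    cs.Pairwise (· ≤ ·) →
    pvGood ivs →
    (∀ iv ∈ ivs.head?, ∃ cj : Int, iv.1 = max 1 (cj - 10) ∧ ∀ c ∈ cs, cj ≤ c) →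
    pvGood (cs.foldl pvAltStep ivs) ∧
    (∀ iv ∈ (cs.foldl pvAltStep ivs).head?, ∃ cj : Int, iv.1 = max 1 (cj - 10)) ∧
    ∀ r, pvCov (cs.foldl pvAltStep ivs) r ↔
      pvCov ivs r ∨ (0 < r ∧ ∃ c ∈ cs, c - 10 ≤ r ∧ r ≤ c + 10) := by
  induction cs with
  | nil =>
    intro ivs _ hg hh
    refine ⟨hg, ?_, by simp⟩
    intro iv hiv
    obtain ⟨cj, h1, _⟩ := hh iv hiv
    exact ⟨cj, h1⟩
  | cons c t ih =>
    intro ivs hsorted hg hh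
    rw [List.pairwise_cons] at hsorted
    simp only [List.foldl_cons]
    -- analyse one step
    have step : pvGood (pvAltStep ivs c) ∧
        (∀ iv ∈ (pvAltStep ivs c).head?, ∃ cj : Int, iv.1 = max 1 (cj - 10) ∧ ∀ c' ∈ t, cj ≤ c') ∧
        (∀ r, pvCov (pvAltStep ivs c) r ↔
          pvCov ivs r ∨ (0 < r ∧ c - 10 ≤ r ∧ r ≤ c + 10)) := by
      obtain ⟨hwf, hp⟩ := hg
      unfold pvAltStep
      by_cases hskip : c + 10 < 1
      · simp only [if_pos hskip]
        refine ⟨⟨hwf, hp⟩, ?_, fun r => ?_⟩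
        · intro iv hiv
          obtain ⟨cj, h1, h2⟩ := hh iv hiv
          exact ⟨cj, h1, fun c' hc' => h2 c' (List.mem_cons_of_mem _ hc')⟩
        · constructor
          · exact Or.inl
          · rintro (h | ⟨h1, h2, h3⟩)
            · exact h
            · omega
      · simp only [if_neg hskip]
        match ivs, hh with
        | [], _ =>
          refine ⟨⟨?_, ?_⟩, ?_, fun r => ?_⟩
          · intro iv hiv
            simp only [List.mem_singleton] at hiv
            subst hiv; constructor <;> simp <;> omega
          · simp
          · intro iv hiv
            simp only [List.head?_cons, Option.mem_some_iff] at hiv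
            subst hiv
            exact ⟨c, rfl, fun c' hc' => hsorted.1 c' hc'⟩
          · simp only [pvCov, List.mem_singleton]
            constructor
            · rintro ⟨iv, rfl, h1, h2⟩
              exact Or.inr ⟨by simp at h1; omega, by simp at h1 h2 ⊢; omega⟩
            · rintro (h | ⟨h1, h2, h3⟩)
              · simp [pvCov] at h
              · exact ⟨_, rfl, by simp; omega, by simp; omega⟩
        | (plo, phi) :: rest, hh =>
          obtain ⟨cj, hc1, hc2⟩ := hh (plo, phi) rfl
          have hcjc : cj ≤ c := hc2 c (List.mem_cons_self ..)
          have hplo : plo ≤ max 1 (c - 10) := by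
            simp only at hc1; omega
          have hwf0 := hwf (plo, phi) (List.mem_cons_self ..)
          simp only at hwf0
          rw [List.pairwise_cons] at hp
          by_cases hmerge : max 1 (c - 10) ≤ phi + 1
          · simp only [if_pos hmerge]
            refine ⟨⟨?_, ?_⟩, ?_, fun r => ?_⟩
            · intro iv hiv
              rcases List.mem_cons.1 hiv with rfl | h
              · constructor <;> simp <;> omega
              · exact hwf iv (List.mem_cons_of_mem _ h)
            · rw [List.pairwise_cons]
              exact ⟨fun b hb => hp.1 b hb, hp.2⟩
            · intro iv hiv
              simp only [List.head?_cons, Option.mem_some_iff] at hiv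
              subst hiv
              exact ⟨cj, hc1, fun c' hc' => hc2 c' (List.mem_cons_of_mem _ hc')⟩
            · simp only [pvCov, List.mem_cons]
              constructor
              · rintro ⟨iv, (rfl | h), h1, h2⟩
                · simp only at h1 h2
                  by_cases hr : r ≤ phi
                  · exact Or.inl ⟨(plo, phi), Or.inl rfl, h1, hr⟩
                  · refine Or.inr ⟨by omega, by omega, by simp at h2; omega⟩
                · exact Or.inl ⟨iv, Or.inr h, h1, h2⟩
              · rintro (⟨iv, (rfl | h), h1, h2⟩ | ⟨h1, h2, h3⟩)
                · exact ⟨(plo, max phi (c + 10)), Or.inl rfl, h1, by simp at h2 ⊢; omega⟩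
                · exact ⟨iv, Or.inr h, h1, h2⟩
                · exact ⟨(plo, max phi (c + 10)), Or.inl rfl, by omega, by simp; omega⟩
          · simp only [if_neg hmerge]
            refine ⟨⟨?_, ?_⟩, ?_, fun r => ?_⟩
            · intro iv hiv
              rcases List.mem_cons.1 hiv with rfl | h
              · constructor <;> simp <;> omega
              · exact hwf iv h
            · rw [List.pairwise_cons]
              refine ⟨?_, hp.2.cons hp.1⟩
              intro b hb
              rcases List.mem_cons.1 hb with rfl | h
              · simp only; omega
              · have := hp.1 b h
                simp only; omega
            · intro iv hiv
              simp only [List.head?_cons, Option.mem_some_iff] at hiv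
              subst hiv
              exact ⟨c, rfl, fun c' hc' => hsorted.1 c' hc'⟩
            · simp only [pvCov, List.mem_cons]
              constructor
              · rintro ⟨iv, (rfl | h), h1, h2⟩
                · exact Or.inr ⟨by omega, by omega, by omega⟩
                · exact Or.inl ⟨iv, h, h1, h2⟩
              · rintro (⟨iv, h, h1, h2⟩ | ⟨h1, h2, h3⟩)
                · exact ⟨iv, Or.inr h, h1, h2⟩
                · exact ⟨(max 1 (c - 10), c + 10), Or.inl rfl, by omega, by omega⟩
    obtain ⟨sg, sh, sc⟩ := step
    obtain ⟨fg, fh, fc⟩ := ih (pvAltStep ivs c) hsorted.2 sg sh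
    refine ⟨fg, fh, fun r => ?_⟩
    rw [fc r, sc r]
    simp only [List.mem_cons]
    constructor
    · rintro ((h | ⟨h1, h2, h3⟩) | ⟨h1, c', hc', h2, h3⟩)
      · exact Or.inl h
      · exact Or.inr ⟨h1, c, Or.inl rfl, h2, h3⟩
      · exact Or.inr ⟨h1, c', Or.inr hc', h2, h3⟩
    · rintro (h | ⟨h1, c', (rfl | hc'), h2, h3⟩)
      · exact Or.inl (Or.inl h)
      · exact Or.inl (Or.inr ⟨h1, h2, h3⟩)
      · exact Or.inr ⟨h1, c', hc', h2, h3⟩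

-- ===== VERDICT (by name: the statement is the Claim_ definition above) =====
theorem get_pocket_residues_simple_spec : Claim_equal_get_pocket_residues_simple := by
  intro pocket_centers cutoff _
  unfold Spec_get_pocket_residues_simple
  obtain ⟨fg, _, fc⟩ := pv_sweep (PySem.List.sorted pocket_centers (fun x => x) false) []
    (PySem.List.sorted_pairwise pocket_centers (fun x => x)) ⟨by simp, List.Pairwise.nil⟩ (by simp)
  have hA : get_pocket_residues_simple pocket_centers cutoff
      = PySem.List.sorted (pocket_centers.foldl (fun s center =>
          (PySem.List.pyRange (-10) 11 1).foldl (fun s offset =>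
            if center + offset > 0 then PySem.Set.add s (center + offset) else s) s) [])
          (fun x => x) false := rfl
  have hB : get_pocket_residues_simple_alt pocket_centers cutoff
      = pvExpand ((PySem.List.sorted pocket_centers (fun x => x) false).foldl pvAltStep []) := rfl
  rw [hA, hB]
  refine PySem.List.sorted_eq_of_perm_of_pairwise_lt _ _ _ ?_ (pvExpand_pairwise _ fg)
  · rw [List.perm_ext_iff_of_nodup (pvExpand_pairwise _ fg).nodup
      (pv_nodup_outer pocket_centers [] List.nodup_nil)]
    intro r
    rw [pvExpand_mem, fc r, pv_mem_outer]
    simp only [pvCov, List.not_mem_nil, false_and, exists_false, false_or,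
      PySem.List.mem_sorted]
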